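-- pv_equiv track=rewrite | github.com/sjain93/practice_repo | test2.py | foo
-- ===== SOURCE A (Python) =====
-- def foo(list):
--     output = []
--     for index, value in enumerate(list):
--         if index%2==0:
--             insert = value + 1
--             output.append(insert)
--         else:
--             insert = value - 1
--             output.append(insert)
--     return output
-- ===== SOURCE B (Python) =====
-- def foo(list):
--     # pairwise recursion-free scan: consume two elements per step (index 2k gets +1, 2k+1 gets -1)
--     xs = [*list]
--     output = []
--     i = 0
--     n = len(xs)
--     while i + 1 < n:
--         output.append(xs[i] + 1)
--         output.append(xs[i + 1] - 1)
--         i += 2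
--     if i < n:
--         output.append(xs[i] + 1)
--     return output
-- ===== Notes on version B (the rewrite author's own statement) =====
-- stated objective: alternative
-- what changed: Replaces the enumerate loop with an index-parity branch by a pairwise scan that consumes two elements per step (first +1, second -1), so no index or parity test is ever computed.
import Mathlib
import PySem

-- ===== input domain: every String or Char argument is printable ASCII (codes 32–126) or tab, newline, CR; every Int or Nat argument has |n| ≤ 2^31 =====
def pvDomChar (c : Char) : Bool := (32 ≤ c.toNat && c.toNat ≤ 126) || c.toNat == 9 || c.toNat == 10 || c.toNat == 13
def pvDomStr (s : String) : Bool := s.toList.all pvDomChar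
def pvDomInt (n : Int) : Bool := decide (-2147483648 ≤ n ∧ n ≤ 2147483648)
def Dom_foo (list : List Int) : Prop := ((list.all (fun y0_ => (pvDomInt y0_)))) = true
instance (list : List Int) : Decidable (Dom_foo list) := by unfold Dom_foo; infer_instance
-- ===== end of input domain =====

-- B changes the decomposition only: a pairwise two-at-a-time scan instead of an enumerate loop with a parity branch (objective: alternative).

-- ===== PORT A =====
-- for index, value in enumerate(list): append value+1 if index even else value-1
def foo (list : List Int) : List Int :=
  (PySem.List.enumerate list).foldl
    (fun output p =>
      if PySem.Int.mod p.1 2 == 0 then output ++ [p.2 + 1] else output ++ [p.2 - 1]) []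

-- ===== PORT B =====
-- the while loop of Source B: consume two elements per step, trailing single element gets +1
def fooAltGo : List Int → List Int
  | [] => []
  | [x] => [x + 1]
  | x :: y :: rest => (x + 1) :: (y - 1) :: fooAltGo rest

def foo_alt (list : List Int) : List Int := fooAltGo list

-- ===== PRECONDITION & SPEC =====
def Spec_foo (list : List Int) (out : List Int) : Prop := out = foo_alt list
instance (list : List Int) (out : List Int) : Decidable (Spec_foo list out) := by unfold Spec_foo; infer_instance

-- ===== CLAIM (what is proved, stated in full; the proofs are below) =====
def Claim_equal_foo : Prop := ∀ (list : List Int), Dom_foo list → Spec_foo list (foo list)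

-- ===== LEMMAS AND PROOFS =====
theorem foo_loop_eq (xs : List Int) : ∀ (k : Nat) (out : List Int),
    (PySem.List.enumerate xs (2 * (k : Int))).foldl
      (fun output p =>
        if PySem.Int.mod p.1 2 == 0 then output ++ [p.2 + 1] else output ++ [p.2 - 1]) out
    = out ++ fooAltGo xs := by
  induction xs using fooAltGo.induct with
  | case1 => intro k out; simp [PySem.List.enumerate_nil, fooAltGo]
  | case2 x =>
    intro k out
    simp [PySem.List.enumerate_cons, PySem.List.enumerate_nil, fooAltGo, PySem.Int.mod]
  | case3 x y rest ih =>
    intro k out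
    have h1 : PySem.Int.mod (2 * (k : Int)) 2 = 0 := by
      simp [PySem.Int.mod]
    have h2 : ¬ PySem.Int.mod (2 * (k : Int) + 1) 2 = 0 := by
      simp [PySem.Int.mod]
    have h3 : (2 * (k : Int) + 1 + 1) = 2 * ((k + 1 : Nat) : Int) := by push_cast; ring
    simp only [PySem.List.enumerate_cons, List.foldl_cons, h1, h2, beq_iff_eq,
      if_pos, if_neg, not_false_iff]
    rw [h3]
    simpa [fooAltGo] using ih (k + 1) (out ++ [x + 1] ++ [y - 1])

-- ===== VERDICT (by name: the statement is the Claim_ definition above) =====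
theorem foo_spec : Claim_equal_foo := by
  intro list _
  unfold Spec_foo foo foo_alt
  have := foo_loop_eq list 0 []
  simpa using this
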